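-- pv_equiv track=rewrite | github.com/MANY-35/OneQuestionADay | programmers/12923/solution.py | func
-- ===== SOURCE A (Python) =====
-- def func(n):
--     if n == 1:
--         return 0
--     l = 1
--     i=1
--     while i*i<=n:
--         i+=1
--         if n % i == 0:
--             div1 = i
--             div2 = int(n/i)
--
--             if div2 <= 10000000:
--                 return int(div2)
--
--             if div1 <= 10000000:
--                 l = max(l, div1)
--     return l
-- ===== SOURCE B (Python) =====
-- def func(n):
--     # gather all divisor pairs up to sqrt(n), then reduce: max of those <= 10**7, default 1
--     if n == 1:
--         return 0
--     divs = []
--     i = 2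
--     while i * i <= n:
--         if n % i == 0:
--             divs.append(i)
--             divs.append(int(n / i))
--         i += 1
--     small = [d for d in divs if d <= 10000000]
--     return max(small, default=1)
-- ===== Notes on version B (the rewrite author's own statement) =====
-- stated objective: alternative
-- what changed: A's single pass with a running accumulator and an early return at the first divisor whose cofactor is small enough is replaced by a gather-then-reduce decomposition: one trial-division loop collects every divisor pair up to the square root, and a separate reduction step returns the largest collected divisor within the threshold, with the same defaults as A for one and for non-positive inputs.
import Mathlib
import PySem

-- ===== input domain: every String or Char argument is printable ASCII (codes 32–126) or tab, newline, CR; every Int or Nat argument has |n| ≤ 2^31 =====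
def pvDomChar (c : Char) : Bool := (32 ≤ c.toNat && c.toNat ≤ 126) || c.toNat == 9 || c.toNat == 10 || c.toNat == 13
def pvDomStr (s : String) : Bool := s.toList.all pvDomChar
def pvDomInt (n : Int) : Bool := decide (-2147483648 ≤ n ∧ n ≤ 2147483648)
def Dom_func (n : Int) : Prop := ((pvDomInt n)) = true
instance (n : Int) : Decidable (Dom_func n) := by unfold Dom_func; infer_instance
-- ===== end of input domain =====

-- B replaces A's early-return running-accumulator scan by a gather-then-reduce decomposition:
-- collect every divisor pair up to sqrt(n), then take the max of those ≤ 10^7 (default 1).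

-- ===== PORT A =====
-- while i*i<=n: i+=1; if n % i == 0: … (early return / running accumulator l)
def funcLoopA (n l i : Int) : Int :=
  if i * i ≤ n then
    -- i += 1; the tested divisor is i+1
    if PySem.Int.mod n (i + 1) = 0 then
      -- div1 = i+1; div2 = int(n/(i+1))  (truncating float division; exact for |n| ≤ 2^31)
      if PySem.Int.truncdiv n (i + 1) ≤ 10000000 then PySem.Int.truncdiv n (i + 1)
      else if i + 1 ≤ 10000000 then funcLoopA n (max l (i + 1)) (i + 1)
      else funcLoopA n l (i + 1)
    else funcLoopA n l (i + 1)
  else l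
termination_by (n + 2 - i).toNat
decreasing_by
  all_goals
    rename_i h _
    have hi : i ≤ n := by
      by_cases hc : i ≤ 0
      · nlinarith
      · nlinarith
    omega

def func (n : Int) : Int :=
  if n = 1 then 0 else funcLoopA n 1 1

-- ===== PORT B =====
-- while i*i<=n: if n % i == 0: divs += [i, int(n/i)]; i += 1
def funcLoopB (n i : Int) (divs : List Int) : List Int :=
  if i * i ≤ n then
    if PySem.Int.mod n i = 0 then
      funcLoopB n (i + 1) (divs ++ [i, PySem.Int.truncdiv n i])
    else funcLoopB n (i + 1) divs
  else divs
termination_by (n + 2 - i).toNat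
decreasing_by
  all_goals
    rename_i h _
    have hi : i ≤ n := by
      by_cases hc : i ≤ 0
      · nlinarith
      · nlinarith
    omega

def func_alt (n : Int) : Int :=
  if n = 1 then 0
  else
    let divs := funcLoopB n 2 []
    let small := divs.filter (fun d => d ≤ 10000000)
    PySem.List.maxD small (fun x => x) 1

-- ===== PRECONDITION & SPEC =====
def Spec_func (n : Int) (out : Int) : Prop := out = func_alt n
instance (n : Int) (out : Int) : Decidable (Spec_func n out) := by unfold Spec_func; infer_instance

-- ===== CLAIM (what is proved, stated in full; the proofs are below) =====
def Claim_equal_func : Prop := ∀ (n : Int), Dom_func n → Spec_func n (func n)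

-- ===== LEMMAS AND PROOFS =====

-- A's conditional running max over a list, used to characterise both loops.
def red (l : Int) (ds : List Int) : Int :=
  ds.foldl (fun a d => if d ≤ 10000000 then max a d else a) l

theorem red_const (l : Int) (ds : List Int) (h : ∀ x ∈ ds, x ≤ 10000000 → x ≤ l) :
    red l ds = l := by
  induction ds with
  | nil => rfl
  | cons d t ih =>
    have hd := h d (by simp)
    simp only [red, List.foldl_cons]
    by_cases hle : d ≤ 10000000
    · have hm : max l d = l := by have := hd hle; omega
      simp only [hle, if_pos, hm]
      exact ih (fun x hx hxle => h x (by simp [hx]) hxle)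
    · simp only [hle, if_false]
      exact ih (fun x hx hxle => h x (by simp [hx]) hxle)

-- B's accumulator is a pure append
theorem loopB_acc (n : Int) : ∀ (i : Int) (_divs0 acc : List Int),
    funcLoopB n i acc = acc ++ funcLoopB n i [] := by
  intro i divs0
  induction i, divs0 using funcLoopB.induct n with
  | case1 i divs hg hm ih =>
    intro acc
    conv_lhs => rw [funcLoopB]
    conv_rhs => rw [funcLoopB]
    simp only [hg, hm, if_pos]
    rw [ih (acc ++ [i, PySem.Int.truncdiv n i]), ih ([] ++ [i, PySem.Int.truncdiv n i])]
    simp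
  | case2 i divs hg hm ih =>
    intro acc
    conv_lhs => rw [funcLoopB]
    conv_rhs => rw [funcLoopB]
    simp only [hg, hm, if_pos, if_false]
    rw [ih acc]
  | case3 i divs hg =>
    intro acc
    conv_lhs => rw [funcLoopB]
    conv_rhs => rw [funcLoopB]
    simp [hg]

-- one-step unfolding of B's loop in list-producing form
theorem loopB_unfold (n i : Int) :
    funcLoopB n i [] =
      if i * i ≤ n then
        (if PySem.Int.mod n i = 0 then [i, PySem.Int.truncdiv n i] ++ funcLoopB n (i + 1) []
         else funcLoopB n (i + 1) [])
      else [] := by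
  conv_lhs => rw [funcLoopB]
  split_ifs with h1 h2
  · rw [loopB_acc n (i+1) [] ([] ++ [i, PySem.Int.truncdiv n i])]; simp
  · rfl
  · rfl

-- every element of B's collected list is a member of a divisor pair with small index ≥ i
theorem memLoopB (n : Int) : ∀ (i : Int) (_divs0 : List Int), ∀ x ∈ funcLoopB n i [],
    ∃ d, i ≤ d ∧ d * d ≤ n ∧ d ∣ n ∧ (x = d ∨ x = PySem.Int.truncdiv n d) := by
  intro i divs0
  induction i, divs0 using funcLoopB.induct n with
  | case1 i divs hg hm ih =>
    intro x hx
    rw [loopB_unfold] at hx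
    simp only [hg, hm, if_pos, List.cons_append, List.nil_append, List.mem_cons] at hx
    have hdvd : i ∣ n := (PySem.Int.mod_eq_zero_iff_dvd n i).mp hm
    rcases hx with h | h | hx
    · exact ⟨i, le_refl _, hg, hdvd, Or.inl h⟩
    · exact ⟨i, le_refl _, hg, hdvd, Or.inr h⟩
    · obtain ⟨d, hd1, hd2, hd3, hd4⟩ := ih x hx
      exact ⟨d, by omega, hd2, hd3, hd4⟩
  | case2 i divs hg hm ih =>
    intro x hx
    rw [loopB_unfold] at hx
    simp only [hg, hm, if_pos, if_false] at hx
    obtain ⟨d, hd1, hd2, hd3, hd4⟩ := ih x hx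
    exact ⟨d, by omega, hd2, hd3, hd4⟩
  | case3 i divs hg =>
    intro x hx
    rw [loopB_unfold] at hx
    simp [hg] at hx

theorem sqrt_bound {n i : Int} (hg : i * i ≤ n) (hn : n ≤ 2147483648) (hi : 1 ≤ i) :
    i ≤ 46340 := by nlinarith

theorem tdiv_exact {n j q : Int} (hj : j ≠ 0) (h : n = j * q) :
    PySem.Int.truncdiv n j = q := by
  subst h
  simp [PySem.Int.truncdiv, Int.mul_tdiv_cancel_left _ hj]

set_option maxHeartbeats 1000000 in
theorem main_lemma (n : Int) (hn : n ≤ 2147483648) :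
    ∀ l i, 1 ≤ i → 1 ≤ l → l ≤ i → (2 ≤ i → n ≠ i * (i + 1)) →
      funcLoopA n l i = red l (funcLoopB n (i + 1) []) := by
  intro l i
  induction l, i using funcLoopA.induct n with
  | case1 l i hg hm hq =>
    -- A returns div2 = n/(i+1) ≤ 10^7
    intro hi hl1 hli hX
    rw [funcLoopA]
    simp only [hg, hm, hq, if_pos]
    have hdvd : (i + 1) ∣ n := (PySem.Int.mod_eq_zero_iff_dvd n (i+1)).mp hm
    obtain ⟨q, hqe⟩ := hdvd
    have htd : PySem.Int.truncdiv n (i + 1) = q := tdiv_exact (by omega) hqe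
    rw [htd] at hq ⊢
    have hn1 : 1 ≤ n := by nlinarith
    have hq1 : 1 ≤ q := by nlinarith
    by_cases hg2 : (i + 1) * (i + 1) ≤ n
    · -- the pair is collected by B as well, and q is the maximum admissible value
      have hiq : i + 1 ≤ q := by nlinarith
      have hib : i + 1 ≤ 46340 := sqrt_bound hg2 hn (by omega)
      rw [loopB_unfold]
      simp only [hg2, hm, if_pos, List.cons_append, List.nil_append, htd]
      simp only [red, List.foldl_cons]
      have h1 : ((i+1 : Int) ≤ 10000000) := by omega
      simp only [h1, if_pos, hq, max_eq_right (by omega : l ≤ i + 1), max_eq_right hiq]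
      refine (red_const q _ ?_).symm
      intro x hx _
      obtain ⟨d, hd1, hd2, hd3, hd4⟩ := memLoopB n (i + 1 + 1) [] x hx
      obtain ⟨e, hee⟩ := hd3
      have he1 : 1 ≤ e := by nlinarith
      have hd0 : 1 ≤ d := by omega
      rcases hd4 with rfl | rfl
      · nlinarith
      · rw [tdiv_exact (by omega) hee]
        nlinarith
    · -- extra iteration past sqrt: forces q = i and n = i*(i+1), only possible for i = 1
      have hB : funcLoopB n (i + 1) [] = [] := by rw [loopB_unfold]; simp [hg2]
      rw [hB]
      have hlt : n < (i + 1) * (i + 1) := by omega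
      have h1 : q ≤ i := by nlinarith
      have h2 : i ≤ q := by nlinarith
      have hqi : q = i := by omega
      by_cases h2i : 2 ≤ i
      · refine absurd ?_ (hX h2i)
        rw [hqe, hqi]; ring
      · have hr : red l [] = l := rfl
        rw [hr]; omega
  | case2 l i hg hm hq hj ih =>
    -- div2 > 10^7, div1 = i+1 ≤ 10^7: A updates its accumulator
    intro hi hl1 hli hX
    rw [funcLoopA]
    simp only [hg, hm, hq, hj, if_pos, if_false]
    have hdvd : (i + 1) ∣ n := (PySem.Int.mod_eq_zero_iff_dvd n (i+1)).mp hm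
    obtain ⟨q, hqe⟩ := hdvd
    have htd : PySem.Int.truncdiv n (i + 1) = q := tdiv_exact (by omega) hqe
    rw [htd] at hq
    have hn1 : 1 ≤ n := by nlinarith
    have hq1 : 1 ≤ q := by nlinarith
    have hib : i ≤ 46340 := sqrt_bound hg hn hi
    by_cases hg2 : (i + 1) * (i + 1) ≤ n
    · rw [loopB_unfold]
      simp only [hg2, hm, if_pos, List.cons_append, List.nil_append, htd]
      simp only [red, List.foldl_cons]
      have h1 : ((i+1 : Int) ≤ 10000000) := by omega
      have h2 : ¬ ((q : Int) ≤ 10000000) := hq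
      simp only [h1, if_pos, h2, if_false]
      refine ih (by omega) (by omega) (by omega) ?_
      intro _ hcon
      have hq2 : q = i + 1 + 1 :=
        mul_left_cancel₀ (show (i+1 : Int) ≠ 0 by omega) (hqe.symm.trans hcon)
      omega
    · -- impossible: q < i+1 ≤ 46341 yet q > 10^7
      exfalso
      have hlt : n < (i + 1) * (i + 1) := by omega
      have : q ≤ i := by nlinarith
      omega
  | case3 l i hg hm hq hj ih =>
    -- div1 = i+1 > 10^7: impossible, i ≤ 46340 within the domain
    intro hi hl1 hli hX
    exfalso
    have hib : i ≤ 46340 := sqrt_bound hg hn hi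
    omega
  | case4 l i hg hm ih =>
    -- i+1 does not divide n: both sides skip
    intro hi hl1 hli hX
    rw [funcLoopA]
    simp only [hg, hm, if_pos, if_false]
    have hX' : 2 ≤ i + 1 → n ≠ (i + 1) * (i + 1 + 1) := by
      intro _ hcon
      exact hm ((PySem.Int.mod_eq_zero_iff_dvd n (i+1)).mpr ⟨i + 1 + 1, hcon⟩)
    by_cases hg2 : (i + 1) * (i + 1) ≤ n
    · conv_rhs => rw [loopB_unfold]
      simp only [hg2, hm, if_pos, if_false]
      exact ih (by omega) hl1 (by omega) hX'
    · have hB1 : funcLoopB n (i + 1) [] = [] := by rw [loopB_unfold]; simp [hg2]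
      have hB2 : funcLoopB n (i + 1 + 1) [] = [] := by
        rw [loopB_unfold]
        have : ¬ (i + 1 + 1) * (i + 1 + 1) ≤ n := by nlinarith
        simp [this]
      rw [hB1]
      have := ih (by omega) hl1 (by omega) hX'
      rw [hB2] at this
      exact this
  | case5 l i hg =>
    intro hi hl1 hli hX
    rw [funcLoopA]
    simp only [hg, if_false]
    have hB : funcLoopB n (i + 1) [] = [] := by
      rw [loopB_unfold]
      have : ¬ (i + 1) * (i + 1) ≤ n := by nlinarith
      simp [this]
    rw [hB]
    rfl

theorem red_eq_foldl_filter (ds : List Int) : ∀ a,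
    red a ds = (ds.filter (fun d => d ≤ 10000000)).foldl max a := by
  induction ds with
  | nil => intro a; rfl
  | cons d t ih =>
    intro a
    simp only [red, List.foldl_cons, List.filter_cons]
    by_cases h : d ≤ 10000000
    · simp only [h, decide_true, if_pos, List.foldl_cons]
      exact ih (max a d)
    · simp only [h, decide_false, if_false]
      exact ih a

theorem bridge (ds : List Int) (h2 : ∀ x ∈ ds, 2 ≤ x) :
    PySem.List.maxD (ds.filter (fun d => d ≤ 10000000)) (fun x => x) 1 = red 1 ds := by
  rw [red_eq_foldl_filter]
  rcases hys : ds.filter (fun d => d ≤ 10000000) with _ | ⟨h, t⟩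
  · rw [hys]; rfl
  · have hh : 2 ≤ h := h2 h (List.mem_of_mem_filter (hys ▸ List.mem_cons_self))
    rw [hys, PySem.List.maxD, PySem.List.max?_id_cons]
    simp only [Option.getD_some, List.foldl_cons]
    have hmx : max (1 : Int) h = h := by omega
    rw [hmx]

-- ===== VERDICT (by name: the statement is the Claim_ definition above) =====
theorem func_spec : Claim_equal_func := by
  intro n hdom
  unfold Spec_func func func_alt
  by_cases h1 : n = 1
  · simp [h1]
  · simp only [h1, if_false]
    have hn : n ≤ 2147483648 := by
      simp only [Dom_func, pvDomInt, decide_eq_true_eq] at hdom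
      exact hdom.2
    have h2 : ∀ x ∈ funcLoopB n 2 [], (2 : Int) ≤ x := by
      intro x hx
      obtain ⟨d, hd1, hd2, hd3, hd4⟩ := memLoopB n 2 [] x hx
      obtain ⟨e, hee⟩ := hd3
      have he1 : 1 ≤ e := by nlinarith
      rcases hd4 with h | h
      · omega
      · rw [h, tdiv_exact (by omega) hee]
        nlinarith
    have hm := main_lemma n hn 1 1 (by omega) (by omega) (by omega) (by omega)
    norm_num at hm
    show funcLoopA n 1 1 =
      PySem.List.maxD ((funcLoopB n 2 []).filter (fun d => d ≤ 10000000)) (fun x => x) 1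
    rw [hm, bridge _ h2]
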